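-- pv_equiv track=rewrite | github.com/JiayangWu/LeetCode-Python-2023 | 2731.移动机器人/2731-移动机器人.py | get_pair_sum
-- ===== SOURCE A (Python) =====
-- def get_pair_sum(nums):
--     pair_sum = 0
--     prefix_sum = [0] * len(nums)
--
--     # Compute prefix sum
--     prefix_sum[0] = nums[0]
--     for i in range(1, len(nums)):
--         prefix_sum[i] = prefix_sum[i-1] + nums[i]
--
--     # Calculate pair sum
--     for i in range(1, len(nums)):
--         pair_sum += nums[i] * i - prefix_sum[i-1]
--
--     return pair_sum
-- ===== SOURCE B (Python) =====
-- def get_pair_sum(nums):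
--     n = len(nums)
--     total = 0
--     for i, x in enumerate(nums):
--         total += x * (2 * i - n + 1)
--     return total
-- ===== Notes on version B (the rewrite author's own statement) =====
-- stated objective: simpler
-- what changed: Replaced the prefix-sum array and two index loops by one enumerate pass accumulating each element's closed-form net contribution nums[i]*(2*i-n+1); no intermediate list is built.
import Mathlib
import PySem

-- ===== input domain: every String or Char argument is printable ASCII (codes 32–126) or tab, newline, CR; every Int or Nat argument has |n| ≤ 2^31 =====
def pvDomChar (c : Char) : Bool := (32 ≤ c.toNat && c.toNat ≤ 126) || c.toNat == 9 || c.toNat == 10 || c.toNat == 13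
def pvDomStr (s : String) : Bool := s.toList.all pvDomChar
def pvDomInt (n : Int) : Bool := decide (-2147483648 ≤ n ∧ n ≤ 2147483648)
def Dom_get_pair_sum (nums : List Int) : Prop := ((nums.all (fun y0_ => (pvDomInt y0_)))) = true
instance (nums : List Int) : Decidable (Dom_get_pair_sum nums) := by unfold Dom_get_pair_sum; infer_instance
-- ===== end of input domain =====

-- B replaces A's prefix-sum array and two index loops by a single enumerate pass
-- adding each element's net contribution nums[i]*(2*i-n+1); same values, O(1) extra space.

-- ===== PORT A =====
def get_pair_sum (nums : List Int) : Int :=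
  let n : Int := nums.length
  -- prefix_sum = [0] * len(nums); prefix_sum[0] = nums[0]  (IndexError on the empty list, excluded by Pre_)
  let prefix1 : List Int :=
    PySem.List.pySetD (List.replicate nums.length (0:Int)) 0 (PySem.List.pyGetD nums 0 0)
  let prefixs : List Int :=
    (PySem.List.pyRange 1 n 1).foldl
      (fun ps i => PySem.List.pySetD ps i
        (PySem.List.pyGetD ps (i-1) 0 + PySem.List.pyGetD nums i 0)) prefix1
  (PySem.List.pyRange 1 n 1).foldl
    (fun acc i => acc + (PySem.List.pyGetD nums i 0 * i - PySem.List.pyGetD prefixs (i-1) 0)) 0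

-- ===== PORT B =====
def get_pair_sum_alt (nums : List Int) : Int :=
  let n : Int := nums.length
  (PySem.List.enumerate nums).foldl (fun total ix => total + ix.2 * (2 * ix.1 - n + 1)) 0

-- ===== PRECONDITION & SPEC =====
-- Pre_ excludes only the empty list, where the Python A raises IndexError reading the first element.
def Pre_get_pair_sum (nums : List Int) : Prop := nums ≠ []
instance (nums : List Int) : Decidable (Pre_get_pair_sum nums) := by unfold Pre_get_pair_sum; infer_instance
def pvWitness_get_pair_sum : List Int := ([1, 2, 3])

def Spec_get_pair_sum (nums : List Int) (out : Int) : Prop := out = get_pair_sum_alt nums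
instance (nums : List Int) (out : Int) : Decidable (Spec_get_pair_sum nums out) := by unfold Spec_get_pair_sum; infer_instance

-- ===== CLAIM (what is proved, stated in full; the proofs are below) =====
def Claim_equal_get_pair_sum : Prop := ∀ (nums : List Int), Dom_get_pair_sum nums → Pre_get_pair_sum nums → Spec_get_pair_sum nums (get_pair_sum nums)

-- ===== LEMMAS AND PROOFS =====

-- value of A's second loop, written as a sum (prefix_sum[i-1] = sum of the first i elements)
def sumA (nums : List Int) : Int :=
  ((PySem.List.pyRange 1 (nums.length : Int) 1).map
    (fun i => PySem.List.pyGetD nums i 0 * i - (nums.take i.toNat).sum)).sum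

-- value of B's loop, written as a sum
def sumB (nums : List Int) : Int :=
  ((PySem.List.enumerate nums).map (fun ix => ix.2 * (2 * ix.1 - (nums.length : Int) + 1))).sum

lemma alt_eq_sumB (nums : List Int) : get_pair_sum_alt nums = sumB nums := by
  unfold get_pair_sum_alt sumB
  rw [PySem.List.foldl_add]
  simp

-- invariant of A's prefix-sum loop
lemma pref_inv (nums : List Int) (h : nums ≠ []) (k : Nat) (hk1 : 1 ≤ k) (hk : k ≤ nums.length) :
    ((PySem.List.pyRange 1 (k : Int) 1).foldl
      (fun ps i => PySem.List.pySetD ps i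
        (PySem.List.pyGetD ps (i-1) 0 + PySem.List.pyGetD nums i 0))
      (PySem.List.pySetD (List.replicate nums.length (0:Int)) 0 (PySem.List.pyGetD nums 0 0))).length
        = nums.length ∧
    ∀ j : Nat, j < k →
      PySem.List.pyGetD ((PySem.List.pyRange 1 (k : Int) 1).foldl
        (fun ps i => PySem.List.pySetD ps i
          (PySem.List.pyGetD ps (i-1) 0 + PySem.List.pyGetD nums i 0))
        (PySem.List.pySetD (List.replicate nums.length (0:Int)) 0 (PySem.List.pyGetD nums 0 0)))
        (j : Int) 0 = (nums.take (j+1)).sum := by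
  induction k, hk1 using Nat.le_induction with
  | base =>
    have h0 : PySem.List.pyRange 1 ((1:Nat) : Int) 1 = [] := by
      apply PySem.List.pyRange_one_eq_nil; norm_num
    rw [h0]
    simp only [List.foldl_nil]
    constructor
    · simp [PySem.List.length_pySetD]
    · intro j hj
      interval_cases j
      cases nums with
      | nil => exact absurd rfl h
      | cons x xs =>
        simp [PySem.List.pySetD_of_nonneg, PySem.List.pyGetD_zero, List.replicate_succ]
  | succ k hk1 ih =>
    have hk' : k ≤ nums.length := by omega
    obtain ⟨ihlen, ihget⟩ := ih hk'
    have hsplit : PySem.List.pyRange 1 (((k+1:Nat)) : Int) 1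
        = PySem.List.pyRange 1 (k : Int) 1 ++ [(k : Int)] := by
      push_cast
      exact PySem.List.pyRange_one_succ_right (by exact_mod_cast hk1)
    rw [hsplit, List.foldl_append, List.foldl_cons, List.foldl_nil]
    set ps := (PySem.List.pyRange 1 (k : Int) 1).foldl
        (fun ps i => PySem.List.pySetD ps i
          (PySem.List.pyGetD ps (i-1) 0 + PySem.List.pyGetD nums i 0))
        (PySem.List.pySetD (List.replicate nums.length (0:Int)) 0 (PySem.List.pyGetD nums 0 0)) with hps
    have hklen : (k : Int) < (ps.length : Int) := by rw [ihlen]; exact_mod_cast (by omega : k < nums.length)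
    constructor
    · rw [PySem.List.length_pySetD, ihlen]
    · intro j hj
      rw [PySem.List.pyGetD_pySetD_natCast _ _ _ _ _ (by simpa [ihlen] using hklen)]
      by_cases hjk : j = k
      · subst hjk
        have h1 : ((j:Int) - 1) = ((j-1 : Nat) : Int) := by omega
        rw [h1, ihget (j-1) (by omega)]
        have h2 : j - 1 + 1 = j := by omega
        rw [h2]
        have hjlt : j < nums.length := by omega
        have h3 : PySem.List.pyGetD nums (j:Int) 0 = nums[j] := by
          rw [PySem.List.pyGetD_eq_getElem] <;> simp [hjlt]
        rw [h3]
        have h4 : List.take (j+1) nums = List.take j nums ++ [nums[j]] := by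
          rw [List.take_add_one]; simp [List.getElem?_eq_getElem hjlt]
        rw [h4, List.sum_append, List.sum_cons, List.sum_nil]
        simp
      · rw [if_neg (by exact_mod_cast hjk)]
        exact ihget j (by omega)

lemma a_eq_sumA (nums : List Int) (h : nums ≠ []) : get_pair_sum nums = sumA nums := by
  unfold get_pair_sum sumA
  simp only []
  have hlen1 : 1 ≤ nums.length := List.length_pos_iff.mpr h
  obtain ⟨ihlen, ihget⟩ := pref_inv nums h nums.length hlen1 le_rfl
  rw [PySem.List.foldl_congr_mem
    (g := fun acc i => acc + (PySem.List.pyGetD nums i 0 * i - (nums.take i.toNat).sum))]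
  · rw [PySem.List.foldl_add
      (g := fun i => PySem.List.pyGetD nums i 0 * i - (nums.take i.toNat).sum)]
    simp
  · intro acc i hi
    rw [PySem.List.mem_pyRange_one] at hi
    obtain ⟨hi1, hi2⟩ := hi
    have hj : (i - 1) = (((i-1).toNat : Nat) : Int) := by omega
    rw [hj, ihget (i-1).toNat (by omega)]
    have : (i-1).toNat + 1 = i.toNat := by omega
    rw [this]

lemma sumA_eq_sumB (nums : List Int) : sumA nums = sumB nums := by
  induction nums using List.reverseRecOn with
  | nil => simp [sumA, sumB, PySem.List.pyRange_one_eq_nil]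
  | append_singleton xs y ih =>
    rcases eq_or_ne xs [] with rfl | hne
    · simp [sumA, sumB, PySem.List.pyRange_one_eq_nil, PySem.List.enumerate]
    · have hlen1 : 1 ≤ xs.length := List.length_pos_iff.mpr hne
      -- A side
      have hA : sumA (xs ++ [y]) = sumA xs + (y * xs.length - xs.sum) := by
        unfold sumA
        have hsplit : PySem.List.pyRange 1 ((xs ++ [y]).length : Int) 1
            = PySem.List.pyRange 1 (xs.length : Int) 1 ++ [(xs.length : Int)] := by
          simp only [List.length_append, List.length_cons, List.length_nil]
          push_cast
          exact PySem.List.pyRange_one_succ_right (by exact_mod_cast hlen1)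
        rw [hsplit, List.map_append, List.sum_append]
        congr 1
        · apply congrArg
          apply List.map_congr_left
          intro i hi
          rw [PySem.List.mem_pyRange_one] at hi
          obtain ⟨hi1, hi2⟩ := hi
          have hitn : i = ((i.toNat : Nat) : Int) := by omega
          have hlt : i.toNat < xs.length := by omega
          rw [hitn]
          simp only [PySem.List.pyGetD_natCast]
          rw [List.getD_append _ _ _ _ (by omega), List.take_append_of_le_length (by omega)]
        · simp only [List.map_cons, List.map_nil, List.sum_cons, List.sum_nil]
          simp [List.getD_eq_getElem?_getD]
      -- B side
      have hB : sumB (xs ++ [y]) = sumB xs - xs.sum + y * xs.length := by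
        unfold sumB
        rw [PySem.List.enumerate_append, List.map_append, List.sum_append]
        have h1 : ((PySem.List.enumerate xs 0).map
            (fun ix => ix.2 * (2 * ix.1 - ((xs ++ [y]).length : Int) + 1))).sum
            = ((PySem.List.enumerate xs 0).map
                (fun ix => ix.2 * (2 * ix.1 - (xs.length : Int) + 1) + (- ix.2))).sum := by
          apply congrArg
          apply List.map_congr_left
          intro ix _
          simp only [List.length_append, List.length_cons, List.length_nil]
          push_cast
          ring
        rw [h1, PySem.List.sum_map_add_int]
        have h2 : ((PySem.List.enumerate xs 0).map (fun ix => -ix.2)).sum = - xs.sum := by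
          have := PySem.List.map_snd_enumerate xs (0:Int)
          calc ((PySem.List.enumerate xs 0).map (fun ix => -ix.2)).sum
              = -(((PySem.List.enumerate xs 0).map (fun ix => ix.2)).sum) := by
                induction PySem.List.enumerate xs 0 with
                | nil => simp
                | cons a t iht => simp [iht]; ring
            _ = - xs.sum := by rw [this]
        rw [h2]
        simp [PySem.List.enumerate]
        ring
      rw [hA, hB, ih]
      ring

-- ===== VERDICT (by name: the statement is the Claim_ definition above) =====
theorem get_pair_sum_spec : Claim_equal_get_pair_sum := by
  intro nums _ hpre
  unfold Spec_get_pair_sum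
  rw [a_eq_sumA nums hpre, alt_eq_sumB, sumA_eq_sumB]
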